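-- pv_equiv track=rewrite | github.com/AdhikariDeepankar/AI-TIC-TAC-TOE--4X4 | TicTacToe.py | available_spaces
-- ===== SOURCE A (Python) =====
-- def available_spaces(matrix):
--     listofEmptyPlaces= []
--     i=0
--     for j in range(0,4):
--         for k in range(0,4):
--             if matrix[j][k]==0:
--                 listofEmptyPlaces.append(i)
--             i=i+1
--     return listofEmptyPlaces
-- ===== SOURCE B (Python) =====
-- def available_spaces(matrix):
--     # Recursive decomposition: recurse over row index, each row recursively
--     # yields the flat indices of its zero cells built back-to-front.
--     return _rows(matrix, 0)
--
-- def _rows(matrix, j):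
--     if j == 4:
--         return []
--     return _row(matrix[j], j, 0) + _rows(matrix, j + 1)
--
-- def _row(row, j, k):
--     if k == 4:
--         return []
--     rest = _row(row, j, k + 1)
--     return [4 * j + k] + rest if row[k] == 0 else rest
-- ===== Notes on version B (the rewrite author's own statement) =====
-- stated objective: alternative
-- what changed: Replaces the nested index loops with a running counter by structural recursion: rows are peeled off one at a time, each row recursively yields the flat indices of its zero cells built back-to-front, and the per-row lists are concatenated with a base offset advancing by 4.
import Mathlib
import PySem

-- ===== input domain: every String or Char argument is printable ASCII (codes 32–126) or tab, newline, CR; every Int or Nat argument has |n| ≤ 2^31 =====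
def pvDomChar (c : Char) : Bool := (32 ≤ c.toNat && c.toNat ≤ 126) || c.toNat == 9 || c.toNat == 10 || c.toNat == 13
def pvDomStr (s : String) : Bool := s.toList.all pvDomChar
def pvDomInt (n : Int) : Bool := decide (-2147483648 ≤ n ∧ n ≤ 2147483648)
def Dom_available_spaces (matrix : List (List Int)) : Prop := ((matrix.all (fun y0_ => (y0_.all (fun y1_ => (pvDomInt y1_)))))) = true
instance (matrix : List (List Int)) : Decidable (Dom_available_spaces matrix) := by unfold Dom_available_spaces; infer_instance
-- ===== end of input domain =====

-- B replaces the nested index loops with a counter by structural recursion over rows/cells, concatenating per-row results with a base offset.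

-- ===== PORT A =====
-- matrix[j][k] is ported with pyGet?; a 'none' (IndexError in Python) is excluded by Pre_.
def available_spaces (matrix : List (List Int)) : List Int :=
  ((PySem.List.pyRange 0 4 1).foldl (fun (st : List Int × Int) j =>
      (PySem.List.pyRange 0 4 1).foldl (fun (st : List Int × Int) k =>
        ((if ((PySem.List.pyGet? matrix j).bind
                (fun r => PySem.List.pyGet? r k)) = some 0
            then st.1 ++ [st.2] else st.1), st.2 + 1)) st)
    (([] : List Int), (0 : Int))).1

-- ===== PORT B =====
-- _row: indices of the row's zero cells, built back-to-front by recursion on k;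
-- row[k] ported with pyGet? (a 'none' = IndexError, excluded by Pre_).
def pvRowB (row : List Int) (j : Nat) (k : Nat) : List Int :=
  -- Python tests 'k == 4'; k only ever reaches 0..4 from the call site, where '4 ≤ k' is the same test (needed for termination)
  if 4 ≤ k then [] else
    let rest := pvRowB row j (k + 1)
    if PySem.List.pyGet? row (k : Int) = some 0 then [4 * (j : Int) + (k : Int)] ++ rest else rest
termination_by 4 - k
decreasing_by omega

-- _rows: recursion on the row index j; matrix[j] ported with pyGet?.
def pvRowsB (matrix : List (List Int)) (j : Nat) : List Int :=
  -- Python tests 'j == 4'; j only ever reaches 0..4 from the call site, where '4 ≤ j' is the same test (needed for termination)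
  if 4 ≤ j then [] else
    (match PySem.List.pyGet? matrix (j : Int) with
     | some row => pvRowB row j 0
     | none => []) ++ pvRowsB matrix (j + 1)
termination_by 4 - j
decreasing_by omega

def available_spaces_alt (matrix : List (List Int)) : List Int :=
  pvRowsB matrix 0

-- ===== PRECONDITION & SPEC =====
-- Pre_ excludes exactly the inputs where Python A raises IndexError: fewer than 4 rows, or one of the first 4 rows shorter than 4.
def Pre_available_spaces (matrix : List (List Int)) : Prop :=
  4 ≤ matrix.length ∧ ∀ r ∈ matrix.take 4, 4 ≤ r.length
instance (matrix : List (List Int)) : Decidable (Pre_available_spaces matrix) := by unfold Pre_available_spaces; infer_instance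
def pvWitness_available_spaces : List (List Int) :=
  [[0,1,2,0],[3,0,0,4],[1,1,1,1],[0,0,0,5]]
def Spec_available_spaces (matrix : List (List Int)) (out : List Int) : Prop := out = available_spaces_alt matrix
instance (matrix : List (List Int)) (out : List Int) : Decidable (Spec_available_spaces matrix out) := by unfold Spec_available_spaces; infer_instance

-- ===== CLAIM (what is proved, stated in full; the proofs are below) =====
def Claim_equal_available_spaces : Prop := ∀ (matrix : List (List Int)), Dom_available_spaces matrix → Pre_available_spaces matrix → Spec_available_spaces matrix (available_spaces matrix)

-- ===== LEMMAS AND PROOFS =====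

-- helper used only by the proof: the list A's inner loop appends, one if per index
def pvAux (q : Int → Prop) [DecidablePred q] : List Int → Int → List Int
  | [], _ => []
  | k :: ks, i => (if q k then [i] else []) ++ pvAux q ks (i + 1)

theorem pvStepfold (q : Int → Prop) [DecidablePred q] (ks : List Int) (p : List Int × Int) :
    ks.foldl (fun (st : List Int × Int) k =>
      ((if q k then st.1 ++ [st.2] else st.1), st.2 + 1)) p
    = (p.1 ++ pvAux q ks p.2, p.2 + ks.length) := by
  induction ks generalizing p with
  | nil => simp [pvAux]
  | cons k ks ih =>
    simp only [List.foldl_cons, ih, pvAux, List.length_cons]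
    split <;> simp <;> omega

theorem pvGet1 {α : Type} {x0 x1 x2 x3 : α} {l : List α} :
    PySem.List.pyGet? (x0::x1::x2::x3::l) 1 = some x1 := by
  simp only [PySem.List.pyGet?, PySem.List.pyIdx?]
  rw [if_pos (by omega), if_pos (by simp; omega)]; simp
theorem pvGet2 {α : Type} {x0 x1 x2 x3 : α} {l : List α} :
    PySem.List.pyGet? (x0::x1::x2::x3::l) 2 = some x2 := by
  simp only [PySem.List.pyGet?, PySem.List.pyIdx?]
  rw [if_pos (by omega), if_pos (by simp; omega)]; simp
theorem pvGet3 {α : Type} {x0 x1 x2 x3 : α} {l : List α} :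
    PySem.List.pyGet? (x0::x1::x2::x3::l) 3 = some x3 := by
  simp only [PySem.List.pyGet?, PySem.List.pyIdx?]
  rw [if_pos (by omega), if_pos (by simp; omega)]; simp

theorem pvRow4 (x0 x1 x2 x3 i0 i1 i2 i3 : Int) (rest : List Int) :
    (if x0 = 0 then [i0] else []) ++ ((if x1 = 0 then [i1] else []) ++ ((if x2 = 0 then [i2] else []) ++ ((if x3 = 0 then [i3] else []) ++ rest))) =
    (if x0 = 0 then i0 ::
        (if x1 = 0 then i1 :: (if x2 = 0 then i2 :: (if x3 = 0 then [i3] else []) else if x3 = 0 then [i3] else [])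
         else if x2 = 0 then i2 :: (if x3 = 0 then [i3] else []) else if x3 = 0 then [i3] else [])
      else
        (if x1 = 0 then i1 :: (if x2 = 0 then i2 :: (if x3 = 0 then [i3] else []) else if x3 = 0 then [i3] else [])
         else if x2 = 0 then i2 :: (if x3 = 0 then [i3] else []) else if x3 = 0 then [i3] else [])) ++ rest := by
  split_ifs <;> simp

theorem pvRow4Last (x0 x1 x2 x3 i0 i1 i2 i3 : Int) :
    (if x0 = 0 then [i0] else []) ++ ((if x1 = 0 then [i1] else []) ++ ((if x2 = 0 then [i2] else []) ++ (if x3 = 0 then [i3] else []))) =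
    (if x0 = 0 then i0 ::
        (if x1 = 0 then i1 :: (if x2 = 0 then i2 :: (if x3 = 0 then [i3] else []) else if x3 = 0 then [i3] else [])
         else if x2 = 0 then i2 :: (if x3 = 0 then [i3] else []) else if x3 = 0 then [i3] else [])
      else
        (if x1 = 0 then i1 :: (if x2 = 0 then i2 :: (if x3 = 0 then [i3] else []) else if x3 = 0 then [i3] else [])
         else if x2 = 0 then i2 :: (if x3 = 0 then [i3] else []) else if x3 = 0 then [i3] else [])) := by
  split_ifs <;> simp

-- ===== VERDICT (by name: the statement is the Claim_ definition above) =====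
set_option maxRecDepth 10000 in
theorem available_spaces_spec : Claim_equal_available_spaces := by
  intro matrix _ pre
  obtain ⟨hl, hr⟩ := pre
  match matrix, hl with
  | a :: b :: c :: d :: t, _ =>
    have ha : 4 ≤ a.length := hr a (by simp)
    have hb : 4 ≤ b.length := hr b (by simp)
    have hc : 4 ≤ c.length := hr c (by simp)
    have hd : 4 ≤ d.length := hr d (by simp)
    match a, ha with
    | a0 :: a1 :: a2 :: a3 :: _, _ =>
    match b, hb with
    | b0 :: b1 :: b2 :: b3 :: _, _ =>
    match c, hc with
    | c0 :: c1 :: c2 :: c3 :: _, _ =>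
    match d, hd with
    | d0 :: d1 :: d2 :: d3 :: _, _ =>
      show available_spaces _ = available_spaces_alt _
      rw [available_spaces, available_spaces_alt,
          (by decide : PySem.List.pyRange 0 4 1 = [0,1,2,3])]
      simp only [pvStepfold]
      simp [List.foldl_cons, List.foldl_nil, pvAux, pvRowsB, pvRowB,
            pvGet1, pvGet2, pvGet3,
            Option.bind, List.append_assoc, -List.cons_append]
      rw [pvRow4, pvRow4, pvRow4, pvRow4Last]
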